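-- pv_equiv track=rewrite | github.com/sandialabs/pyGSTi | test/helpers/info/process.py | find_uncovered_lines
-- ===== SOURCE A (Python) =====
-- def find_uncovered_lines(packageDict):
--     uncoveredLineDict = {}
--     for filename, fileDict in packageDict.items():
--         for caseDict in fileDict.values():
--             for testinfo, _ in caseDict.values():
--                 for modulename, moduleinfo in testinfo.items():
--                     if modulename not in uncoveredLineDict:
--                         uncoveredLineDict[modulename] = set(moduleinfo[1])
--                     else:
--                         uncoveredLineDict[modulename] = uncoveredLineDict[modulename].intersection(set(moduleinfo[1]))
--     return uncoveredLineDict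
-- ===== SOURCE B (Python) =====
-- def find_uncovered_lines(packageDict):
--     # Counting algorithm instead of set intersection: per module keep how many
--     # line-lists were seen, the distinct lines of the FIRST list, and how many
--     # lists contain each of those lines; a line is uncovered everywhere iff its
--     # count equals the number of lists.
--     stats = {}  # module -> [lists seen, distinct lines of first list, {line: lists containing it}]
--     for fileDict in packageDict.values():
--         for caseDict in fileDict.values():
--             for testinfo, _ in caseDict.values():
--                 for modulename, moduleinfo in testinfo.items():
--                     distinct = list(dict.fromkeys(moduleinfo[1]))
--                     s = stats.get(modulename)
--                     if s is None:
--                         stats[modulename] = [1, distinct, {x: 1 for x in distinct}]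
--                     else:
--                         s[0] += 1
--                         c = s[2]
--                         for x in distinct:
--                             if x in c:
--                                 c[x] += 1
--     return {m: {x for x in first if cnt[x] == n}
--             for m, (n, first, cnt) in stats.items()}
-- ===== Notes on version B (the rewrite author's own statement) =====
-- stated objective: alternative
-- what changed: A intersects sets incrementally; B never intersects: it counts, per module, how many line-lists were seen and in how many of them each line of the first list occurs, then keeps the lines whose count equals the number of lists (threshold/counting algorithm instead of set intersection).
import Mathlib
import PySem

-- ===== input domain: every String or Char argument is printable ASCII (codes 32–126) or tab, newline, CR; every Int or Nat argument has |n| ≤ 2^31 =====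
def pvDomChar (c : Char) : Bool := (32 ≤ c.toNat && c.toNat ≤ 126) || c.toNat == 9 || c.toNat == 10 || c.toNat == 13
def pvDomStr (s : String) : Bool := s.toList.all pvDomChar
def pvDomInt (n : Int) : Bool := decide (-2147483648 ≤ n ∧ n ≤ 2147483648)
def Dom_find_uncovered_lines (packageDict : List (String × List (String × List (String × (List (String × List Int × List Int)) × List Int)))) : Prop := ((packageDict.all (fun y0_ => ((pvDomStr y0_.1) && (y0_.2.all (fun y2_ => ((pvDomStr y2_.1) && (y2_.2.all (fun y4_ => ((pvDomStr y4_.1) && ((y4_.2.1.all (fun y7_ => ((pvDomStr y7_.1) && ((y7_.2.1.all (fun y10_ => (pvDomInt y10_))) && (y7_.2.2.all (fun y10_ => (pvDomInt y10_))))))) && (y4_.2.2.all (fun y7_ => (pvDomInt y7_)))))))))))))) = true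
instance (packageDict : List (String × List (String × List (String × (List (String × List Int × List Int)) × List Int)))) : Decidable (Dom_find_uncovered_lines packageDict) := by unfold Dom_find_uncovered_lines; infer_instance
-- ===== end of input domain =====

-- B replaces A's incremental set intersection with a counting algorithm: per module it counts
-- the line-lists and how many of them contain each line of the first list, then keeps the lines
-- whose count reaches the number of lists (objective: alternative, same cost).

-- ===== PORT A =====
-- body of A's innermost loop: the membership-tested incremental intersection
def pvStepA (d : PySem.Dict String (PySem.Set Int)) (m : String) (lines : List Int) : PySem.Dict String (PySem.Set Int) :=
  if d.contains m = false then d.insert m (PySem.Set.ofList lines)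
  else d.insert m (PySem.Set.inter (d.getD m PySem.Set.empty) (PySem.Set.ofList lines))

def find_uncovered_lines (packageDict : List (String × List (String × List (String × (List (String × List Int × List Int)) × List Int)))) : List (String × List Int) :=
  (packageDict.foldl (fun d fileEntry =>
    fileEntry.2.foldl (fun d caseEntry =>
      caseEntry.2.foldl (fun d testEntry =>
        testEntry.2.1.foldl (fun d modEntry => pvStepA d modEntry.1 modEntry.2.2) d) d) d)
    PySem.Dict.empty).items

-- ===== PORT B =====
-- {x: 1 for x in distinct}
def pvInitCounts (distinct : List Int) : PySem.Dict Int Int :=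
  distinct.foldl (fun c x => c.insert x 1) PySem.Dict.empty

-- 'for x in distinct: if x in c: c[x] += 1'
def pvBump (c : PySem.Dict Int Int) (distinct : List Int) : PySem.Dict Int Int :=
  distinct.foldl (fun c x => if c.contains x then c.insert x (c.getD x 0 + 1) else c) c

-- body of B's innermost loop (in-place mutation of the stats triple = overwrite at the key)
def pvStepB (stats : PySem.Dict String (Int × List Int × PySem.Dict Int Int)) (m : String) (lines : List Int) : PySem.Dict String (Int × List Int × PySem.Dict Int Int) :=
  let distinct := PySem.List.dedup lines
  match stats.get? m with
  | none => stats.insert m (1, distinct, pvInitCounts distinct)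
  | some (n, first, c) => stats.insert m (n + 1, first, pvBump c distinct)

def find_uncovered_lines_alt (packageDict : List (String × List (String × List (String × (List (String × List Int × List Int)) × List Int)))) : List (String × List Int) :=
  let stats := packageDict.foldl (fun st fileEntry =>
    fileEntry.2.foldl (fun st caseEntry =>
      caseEntry.2.foldl (fun st testEntry =>
        testEntry.2.1.foldl (fun st modEntry => pvStepB st modEntry.1 modEntry.2.2) st) st) st)
    PySem.Dict.empty
  -- cnt[x]: x is always a key of cnt (it comes from the first list), so getD's default is never used
  stats.items.map (fun kv =>
    (kv.1, PySem.Set.ofList (kv.2.2.1.filter (fun x => kv.2.2.2.getD x 0 == kv.2.1))))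

-- ===== PRECONDITION & SPEC =====
def Spec_find_uncovered_lines (packageDict : List (String × List (String × List (String × (List (String × List Int × List Int)) × List Int)))) (out : List (String × List Int)) : Prop := out = find_uncovered_lines_alt packageDict
instance (packageDict : List (String × List (String × List (String × (List (String × List Int × List Int)) × List Int)))) (out : List (String × List Int)) : Decidable (Spec_find_uncovered_lines packageDict out) := by unfold Spec_find_uncovered_lines; infer_instance

-- ===== CLAIM =====
def Claim_equal_find_uncovered_lines : Prop := ∀ (packageDict : List (String × List (String × List (String × (List (String × List Int × List Int)) × List Int)))), Dom_find_uncovered_lines packageDict → Spec_find_uncovered_lines packageDict (find_uncovered_lines packageDict)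

-- ===== LEMMAS AND PROOFS =====

-- the flattened (modulename, moduleinfo[1]) pair list both folds traverse
def pvPairs (packageDict : List (String × List (String × List (String × (List (String × List Int × List Int)) × List Int)))) : List (String × List Int) :=
  packageDict.flatMap (fun fileEntry =>
    fileEntry.2.flatMap (fun caseEntry =>
      caseEntry.2.flatMap (fun testEntry =>
        testEntry.2.1.map (fun modEntry => (modEntry.1, modEntry.2.2)))))

-- A's fold over the explicit pair list
def pvAF (ps : List (String × List Int)) (d : PySem.Dict String (PySem.Set Int)) : PySem.Dict String (PySem.Set Int) :=
  ps.foldl (fun d p => pvStepA d p.1 p.2) d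

-- B's fold over the explicit pair list
def pvBF (ps : List (String × List Int)) (d : PySem.Dict String (Int × List Int × PySem.Dict Int Int)) : PySem.Dict String (Int × List Int × PySem.Dict Int Int) :=
  ps.foldl (fun d p => pvStepB d p.1 p.2) d

lemma pvStepA_eq_insert (d : PySem.Dict String (PySem.Set Int)) (m : String) (lines : List Int) :
    pvStepA d m lines = d.insert m (if d.contains m = false then PySem.Set.ofList lines
      else PySem.Set.inter (d.getD m PySem.Set.empty) (PySem.Set.ofList lines)) := by
  unfold pvStepA; split <;> rfl

lemma pvStepB_eq_insert (d : PySem.Dict String (Int × List Int × PySem.Dict Int Int)) (m : String) (lines : List Int) :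
    pvStepB d m lines = d.insert m (match d.get? m with
      | none => (1, PySem.List.dedup lines, pvInitCounts (PySem.List.dedup lines))
      | some (n, first, c) => (n + 1, first, pvBump c (PySem.List.dedup lines))) := by
  unfold pvStepB
  rcases h : d.get? m with _ | ⟨n, first, c⟩ <;> simp [h]

lemma pvA_flatten (packageDict : List (String × List (String × List (String × (List (String × List Int × List Int)) × List Int)))) :
    find_uncovered_lines packageDict = (pvAF (pvPairs packageDict) PySem.Dict.empty).items := by
  simp [find_uncovered_lines, pvPairs, pvAF, List.foldl_flatMap, List.foldl_map]

lemma pvB_flatten (packageDict : List (String × List (String × List (String × (List (String × List Int × List Int)) × List Int)))) :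
    find_uncovered_lines_alt packageDict = (pvBF (pvPairs packageDict) PySem.Dict.empty).items.map (fun kv =>
      (kv.1, PySem.Set.ofList (kv.2.2.1.filter (fun x => kv.2.2.2.getD x 0 == kv.2.1)))) := by
  simp [find_uncovered_lines_alt, pvPairs, pvBF, List.foldl_flatMap, List.foldl_map]

-- per-key optional accumulators
def pvOStep (o : Option (PySem.Set Int)) (l : List Int) : Option (PySem.Set Int) :=
  some (match o with
        | none => PySem.Set.ofList l
        | some s => PySem.Set.inter s (PySem.Set.ofList l))

def pvOStepB (o : Option (Int × List Int × PySem.Dict Int Int)) (l : List Int) : Option (Int × List Int × PySem.Dict Int Int) :=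
  some (match o with
        | none => (1, PySem.List.dedup l, pvInitCounts (PySem.List.dedup l))
        | some (n, first, c) => (n + 1, first, pvBump c (PySem.List.dedup l)))

lemma pvAF_get? (ps : List (String × List Int)) (d : PySem.Dict String (PySem.Set Int)) (m : String) :
    (pvAF ps d).get? m = ((ps.filter (fun p => p.1 == m)).map (·.2)).foldl pvOStep (d.get? m) := by
  induction ps generalizing d with
  | nil => rfl
  | cons p ps ih =>
    show (pvAF ps (pvStepA d p.1 p.2)).get? m = _
    rw [ih]
    by_cases hm : p.1 = m
    · subst hm
      by_cases hc : d.contains p.1 = false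
      · have h0 : d.get? p.1 = none := by
          rw [PySem.Dict.get?_eq_none_iff_contains]; exact hc
        simp [pvStepA, hc, PySem.Dict.get?_insert_self, h0, pvOStep]
      · have h1 : d.contains p.1 = true := by
          cases h : d.contains p.1 <;> simp_all
        obtain ⟨s, hs⟩ : ∃ s, d.get? p.1 = some s := by
          have := PySem.Dict.contains_eq_isSome_get? (d := d) (k := p.1)
          rw [h1] at this
          exact Option.isSome_iff_exists.mp this.symm
        have hgd : d.getD p.1 ([] : PySem.Set Int) = s := PySem.Dict.getD_of_get?_eq_some _ _ hs
        simp [pvStepA, hc, PySem.Dict.get?_insert_self, hs, hgd, pvOStep]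
    · have hne : ¬ (p.1 == m) = true := by simp [hm]
      rw [pvStepA_eq_insert, PySem.Dict.get?_insert_of_ne _ _ (show m ≠ p.1 from fun hmm => hm hmm.symm)]
      simp [hne]

lemma pvBF_get? (ps : List (String × List Int)) (d : PySem.Dict String (Int × List Int × PySem.Dict Int Int)) (m : String) :
    (pvBF ps d).get? m = ((ps.filter (fun p => p.1 == m)).map (·.2)).foldl pvOStepB (d.get? m) := by
  induction ps generalizing d with
  | nil => rfl
  | cons p ps ih =>
    show (pvBF ps (pvStepB d p.1 p.2)).get? m = _
    rw [ih]
    by_cases hm : p.1 = m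
    · subst hm
      rcases h : d.get? p.1 with _ | ⟨n, first, c⟩
      · simp [pvStepB, h, PySem.Dict.get?_insert_self, pvOStepB]
      · simp [pvStepB, h, PySem.Dict.get?_insert_self, pvOStepB]
    · have hne : ¬ (p.1 == m) = true := by simp [hm]
      rw [pvStepB_eq_insert, PySem.Dict.get?_insert_of_ne _ _ (show m ≠ p.1 from fun hmm => hm hmm.symm)]
      simp [hne]

lemma pvOStep_some (ls : List (List Int)) (s : PySem.Set Int) :
    ls.foldl pvOStep (some s) = some (ls.foldl (fun s l => PySem.Set.inter s (PySem.Set.ofList l)) s) := by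
  induction ls generalizing s with
  | nil => rfl
  | cons l ls ih => simpa [pvOStep] using ih (PySem.Set.inter s (PySem.Set.ofList l))

lemma pvOStepB_some (ls : List (List Int)) (n : Int) (first : List Int) (c : PySem.Dict Int Int) :
    ls.foldl pvOStepB (some (n, first, c)) =
      some (n + ls.length, first, ls.foldl (fun c l => pvBump c (PySem.List.dedup l)) c) := by
  induction ls generalizing n c with
  | nil => simp
  | cons l ls ih =>
    rw [List.foldl_cons, show pvOStepB (some (n, first, c)) l
        = some (n + 1, first, pvBump c (PySem.List.dedup l)) from rfl, ih]
    simp; omega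

-- keys and key-uniqueness of the two accumulated dicts
lemma pvAF_keys (ps : List (String × List Int)) :
    (pvAF ps PySem.Dict.empty).keys = PySem.Set.ofList (ps.map (·.1)) := by
  unfold pvAF
  have h : (fun (d : PySem.Dict String (PySem.Set Int)) (p : String × List Int) => pvStepA d p.1 p.2)
      = fun d p => d.insert p.1 (if d.contains p.1 = false then PySem.Set.ofList p.2
          else PySem.Set.inter (d.getD p.1 PySem.Set.empty) (PySem.Set.ofList p.2)) := by
    funext d p; exact pvStepA_eq_insert d p.1 p.2
  rw [h, PySem.Dict.keys_foldl_insert_key]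
  rfl

lemma pvAF_nodup_keys (ps : List (String × List Int)) :
    (pvAF ps PySem.Dict.empty).keys.Nodup := by
  unfold pvAF
  have h : (fun (d : PySem.Dict String (PySem.Set Int)) (p : String × List Int) => pvStepA d p.1 p.2)
      = fun d p => d.insert p.1 (if d.contains p.1 = false then PySem.Set.ofList p.2
          else PySem.Set.inter (d.getD p.1 PySem.Set.empty) (PySem.Set.ofList p.2)) := by
    funext d p; exact pvStepA_eq_insert d p.1 p.2
  rw [h]
  exact PySem.Dict.nodup_keys_foldl_insert_key ps Prod.fst _ _ PySem.Dict.nodup_keys_empty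

lemma pvBF_keys (ps : List (String × List Int)) :
    (pvBF ps PySem.Dict.empty).keys = PySem.Set.ofList (ps.map (·.1)) := by
  unfold pvBF
  have h : (fun (d : PySem.Dict String (Int × List Int × PySem.Dict Int Int)) (p : String × List Int) => pvStepB d p.1 p.2)
      = fun d p => d.insert p.1 (match d.get? p.1 with
          | none => (1, PySem.List.dedup p.2, pvInitCounts (PySem.List.dedup p.2))
          | some (n, first, c) => (n + 1, first, pvBump c (PySem.List.dedup p.2))) := by
    funext d p; exact pvStepB_eq_insert d p.1 p.2
  rw [h, PySem.Dict.keys_foldl_insert_key]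
  rfl

lemma pvBF_nodup_keys (ps : List (String × List Int)) :
    (pvBF ps PySem.Dict.empty).keys.Nodup := by
  unfold pvBF
  have h : (fun (d : PySem.Dict String (Int × List Int × PySem.Dict Int Int)) (p : String × List Int) => pvStepB d p.1 p.2)
      = fun d p => d.insert p.1 (match d.get? p.1 with
          | none => (1, PySem.List.dedup p.2, pvInitCounts (PySem.List.dedup p.2))
          | some (n, first, c) => (n + 1, first, pvBump c (PySem.List.dedup p.2))) := by
    funext d p; exact pvStepB_eq_insert d p.1 p.2
  rw [h]
  exact PySem.Dict.nodup_keys_foldl_insert_key ps Prod.fst _ _ PySem.Dict.nodup_keys_empty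

-- counting facts
lemma pvInitCounts_getD (distinct : List Int) (x : Int) :
    (pvInitCounts distinct).getD x 0 = if x ∈ distinct then 1 else 0 := by
  suffices h : ∀ c : PySem.Dict Int Int,
      (distinct.foldl (fun c x => c.insert x 1) c).getD x 0 = if x ∈ distinct then 1 else c.getD x 0 by
    simpa [pvInitCounts] using h PySem.Dict.empty
  induction distinct with
  | nil => intro c; simp
  | cons y d ih =>
    intro c
    rw [List.foldl_cons, ih]
    by_cases hx : x = y
    · subst hx
      by_cases hd : x ∈ d <;> simp [hd, PySem.Dict.getD_insert_self]
    · simp [List.mem_cons, hx, PySem.Dict.getD_insert_of_ne _ _ _ (show x ≠ y from hx)]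

lemma pvInitCounts_contains (distinct : List Int) (x : Int) :
    (pvInitCounts distinct).contains x = decide (x ∈ distinct) := by
  suffices h : ∀ c : PySem.Dict Int Int,
      (distinct.foldl (fun c x => c.insert x 1) c).contains x = (decide (x ∈ distinct) || c.contains x) by
    simpa [pvInitCounts] using h PySem.Dict.empty
  induction distinct with
  | nil => intro c; simp
  | cons y d ih =>
    intro c
    rw [List.foldl_cons, ih]
    by_cases hx : x = y
    · simp [hx, PySem.Dict.contains_insert]
    · have hxy : (x == y) = false := beq_eq_false_iff_ne.mpr hx
      simp [PySem.Dict.contains_insert, hxy, hx]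

lemma pvBump_contains (c : PySem.Dict Int Int) (distinct : List Int) (x : Int) :
    (pvBump c distinct).contains x = c.contains x := by
  induction distinct generalizing c with
  | nil => rfl
  | cons y d ih =>
    show (pvBump (if c.contains y then c.insert y (c.getD y 0 + 1) else c) d).contains x = _
    rw [ih]
    by_cases hy : c.contains y
    · by_cases hx : x = y
      · subst hx; simp [hy, PySem.Dict.contains_insert]
      · simp [hy, PySem.Dict.contains_insert, hx]
    · simp [hy]

lemma pvBump_getD (c : PySem.Dict Int Int) (distinct : List Int) (hnd : distinct.Nodup) (x : Int) :
    (pvBump c distinct).getD x 0 =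
      c.getD x 0 + (if x ∈ distinct ∧ c.contains x = true then 1 else 0) := by
  induction distinct generalizing c with
  | nil => simp [pvBump]
  | cons y d ih =>
    rcases List.nodup_cons.mp hnd with ⟨hy_not, hd⟩
    show (pvBump (if c.contains y then c.insert y (c.getD y 0 + 1) else c) d).getD x 0 = _
    rw [ih _ hd]
    by_cases hcy : c.contains y = true
    · by_cases hx : x = y
      · subst hx
        simp [hcy, PySem.Dict.getD_insert_self, hy_not, PySem.Dict.contains_insert]
      · have h1 : (c.insert y (c.getD y 0 + 1)).getD x 0 = c.getD x 0 :=
          PySem.Dict.getD_insert_of_ne _ _ _ (show x ≠ y from hx)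
        have h2 : (c.insert y (c.getD y 0 + 1)).contains x = c.contains x := by
          simp [PySem.Dict.contains_insert, hx]
        simp only [hcy, if_true, h1, h2, List.mem_cons]
        by_cases hxd : x ∈ d <;> by_cases hcx : c.contains x = true <;> simp [hxd, hcx, hx]
    · by_cases hx : x = y
      · subst hx
        simp [hcy, hy_not]
      · simp [hcy, List.mem_cons, hx]

-- counts after the whole fold over the remaining lists
lemma pvCnt_getD (ls : List (List Int)) (c : PySem.Dict Int Int) (x : Int) (hc : c.contains x = true) :
    (ls.foldl (fun c l => pvBump c (PySem.List.dedup l)) c).getD x 0 =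
      c.getD x 0 + (ls.countP (fun l => decide (x ∈ l)) : Int) := by
  induction ls generalizing c with
  | nil => simp
  | cons l ls ih =>
    rw [List.foldl_cons, ih _ (by rw [pvBump_contains]; exact hc),
        pvBump_getD c _ (by rw [PySem.List.dedup_eq_ofList]; exact PySem.Set.nodup_ofList l),
        List.countP_cons]
    have hmem : x ∈ PySem.List.dedup l ↔ x ∈ l := by
      rw [PySem.List.dedup_eq_ofList]; exact PySem.Set.mem_ofList l x
    by_cases hx : x ∈ l <;> simp [hmem, hx, hc] <;> omega

-- A's intersection chain is one filter over the first set
lemma pv_inter_fold (ls : List (List Int)) (s : PySem.Set Int) :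
    ls.foldl (fun s l => PySem.Set.inter s (PySem.Set.ofList l)) s =
      s.filter (fun x => ls.all (fun l => decide (x ∈ l))) := by
  induction ls generalizing s with
  | nil => simp
  | cons l ls ih =>
    rw [List.foldl_cons, ih, PySem.Set.inter, List.filter_filter]
    apply List.filter_congr
    intro x _
    have : (PySem.Set.ofList l).contains x = decide (x ∈ l) := by
      simp [PySem.Set.contains_eq_listContains, PySem.Set.mem_ofList]
    simp [this, Bool.and_comm]

-- the filtered pair list of a key that occurs is nonempty
lemma pv_filter_ne_nil (ps : List (String × List Int)) (m : String) (hm : m ∈ ps.map (·.1)) :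
    (ps.filter (fun p => p.1 == m)).map (·.2) ≠ [] := by
  obtain ⟨p, hp, hp1⟩ := List.mem_map.mp hm
  have : p ∈ ps.filter (fun p => p.1 == m) := List.mem_filter.mpr ⟨hp, by simp [hp1]⟩
  intro h
  exact List.eq_nil_iff_forall_not_mem.mp (List.map_eq_nil_iff.mp h) p this

-- the per-key value equality: intersection chain = threshold filter on counts
lemma pv_key_value (l0 : List Int) (ls : List (List Int)) :
    ls.foldl (fun s l => PySem.Set.inter s (PySem.Set.ofList l)) (PySem.Set.ofList l0) =
      PySem.Set.ofList ((PySem.List.dedup l0).filter (fun x =>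
        (ls.foldl (fun c l => pvBump c (PySem.List.dedup l)) (pvInitCounts (PySem.List.dedup l0))).getD x 0
          == (1 + (ls.length : Int)))) := by
  rw [pv_inter_fold, PySem.List.dedup_eq_ofList]
  have hnd : (PySem.Set.ofList l0).Nodup := PySem.Set.nodup_ofList l0
  rw [PySem.Set.ofList_eq_self_of_nodup _ (hnd.filter _)]
  apply List.filter_congr
  intro x hx
  have hcx : (pvInitCounts (PySem.Set.ofList l0)).contains x = true := by
    rw [show PySem.Set.ofList l0 = PySem.List.dedup l0 from (PySem.List.dedup_eq_ofList l0).symm,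
        pvInitCounts_contains]
    rw [PySem.List.dedup_eq_ofList]
    exact decide_eq_true hx
  rw [pvCnt_getD _ _ _ hcx,
      show PySem.Set.ofList l0 = PySem.List.dedup l0 from (PySem.List.dedup_eq_ofList l0).symm,
      pvInitCounts_getD]
  have hx0 : x ∈ PySem.List.dedup l0 := by rw [PySem.List.dedup_eq_ofList]; exact hx
  rw [if_pos hx0]
  rw [Bool.eq_iff_iff]
  constructor
  · intro h
    have : ls.countP (fun l => decide (x ∈ l)) = ls.length :=
      List.countP_eq_length.mpr (by simpa [List.all_eq_true] using h)
    simp [this]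
  · intro h
    have heq : (1 : Int) + (ls.countP (fun l => decide (x ∈ l)) : Int) = 1 + (ls.length : Int) := by
      simpa using h
    have hcc : ls.countP (fun l => decide (x ∈ l)) = ls.length := by
      exact_mod_cast (by omega : ((ls.countP (fun l => decide (x ∈ l)) : Int)) = (ls.length : Int))
    simpa [List.all_eq_true] using List.countP_eq_length.mp hcc

-- ===== VERDICT =====
theorem find_uncovered_lines_spec : Claim_equal_find_uncovered_lines := by
  unfold Claim_equal_find_uncovered_lines
  intro packageDict _
  unfold Spec_find_uncovered_lines
  rw [pvA_flatten, pvB_flatten]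
  set ps := pvPairs packageDict
  rw [PySem.Dict.items_eq_map_keys _ (pvAF_nodup_keys ps) PySem.Set.empty,
      PySem.Dict.items_eq_map_keys _ (pvBF_nodup_keys ps) ((0 : Int), ([] : List Int), PySem.Dict.empty),
      pvAF_keys, pvBF_keys, List.map_map]
  apply List.map_congr_left
  intro m hm
  have hmem : m ∈ ps.map (·.1) := (PySem.Set.mem_ofList _ _).mp hm
  simp only [Function.comp]
  congr 1
  rw [PySem.Dict.getD_eq_get?_getD, PySem.Dict.getD_eq_get?_getD, pvAF_get?, pvBF_get?,
      PySem.Dict.get?_empty, PySem.Dict.get?_empty]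
  rcases h : (ps.filter (fun p => p.1 == m)).map (·.2) with _ | ⟨l, ls⟩
  · exact absurd h (pv_filter_ne_nil ps m hmem)
  · rw [h, List.foldl_cons, List.foldl_cons,
        show pvOStep none l = some (PySem.Set.ofList l) from rfl,
        show pvOStepB none l = some (1, PySem.List.dedup l, pvInitCounts (PySem.List.dedup l)) from rfl,
        pvOStep_some, pvOStepB_some]
    simp only [Option.getD_some]
    exact pv_key_value l ls
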